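-- pv_equiv track=rewrite | github.com/yseokchoi/SejongTree2Dependency | Tree.py | moveSymbolHead
-- ===== SOURCE A (Python) =====
-- def moveSymbolHead(head_list):
--     linear_and_symbol_rules = {b:a for a, b, rule, _, _, _ in head_list if rule}
--     result_head = []
--     for a, b, rule, s_rule, label, except_PRN in head_list:
--         if s_rule:
--             target_a = a
--             while target_a in linear_and_symbol_rules:
--                 target_a = linear_and_symbol_rules[target_a]
--             result_head.append((target_a, b, rule, s_rule, label, except_PRN))
--         else:
--             result_head.append((a, b, rule, s_rule, label, except_PRN))
--     return result_head
-- ===== SOURCE B (Python) =====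
-- def moveSymbolHead(head_list):
--     mapping = {b: a for a, b, rule, _, _, _ in head_list if rule}
--     memo = {}
--
--     def resolve(x):
--         path = []
--         while x in mapping and x not in memo and x not in path:
--             path.append(x)
--             x = mapping[x]
--         root = memo.get(x, x)
--         for p in path:
--             memo[p] = root
--         return root
--
--     return [(resolve(a) if s_rule else a, b, rule, s_rule, label, except_PRN)
--             for a, b, rule, s_rule, label, except_PRN in head_list]
-- ===== Notes on version B (the rewrite author's own statement) =====
-- stated objective: alternative
-- what changed: Instead of re-walking the whole symbol-head chain from scratch for every entry, B resolves each chain once through a memo table with path compression (and stops on a revisited symbol, where A's while loop never terminates), so each visited symbol's terminal head is computed and cached a single time.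
import Mathlib
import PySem

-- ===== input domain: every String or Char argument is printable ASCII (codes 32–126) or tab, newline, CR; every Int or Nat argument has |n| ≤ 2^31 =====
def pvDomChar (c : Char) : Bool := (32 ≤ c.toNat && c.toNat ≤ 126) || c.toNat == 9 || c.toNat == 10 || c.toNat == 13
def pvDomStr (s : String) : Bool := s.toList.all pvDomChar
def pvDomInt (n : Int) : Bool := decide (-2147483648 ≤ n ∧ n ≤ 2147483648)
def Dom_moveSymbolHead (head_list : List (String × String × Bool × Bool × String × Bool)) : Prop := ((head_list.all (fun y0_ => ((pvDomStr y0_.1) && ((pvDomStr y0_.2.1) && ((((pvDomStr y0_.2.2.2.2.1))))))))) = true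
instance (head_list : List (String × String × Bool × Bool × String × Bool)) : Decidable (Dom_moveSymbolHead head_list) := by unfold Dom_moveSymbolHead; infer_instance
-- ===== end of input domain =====

-- B replaces A's per-entry chain re-walk by a memoized, path-compressed resolution (alternative algorithm).
-- ===== PORT A =====

-- {b: a for a, b, rule, _, _, _ in head_list if rule}  (shared by both ports and Pre_)
def pvRules (head_list : List (String × String × Bool × Bool × String × Bool)) :
    PySem.Dict String String :=
  head_list.foldl (fun d e => if e.2.2.1 then d.insert e.2.1 e.1 else d) PySem.Dict.empty

-- A's `while target_a in linear_and_symbol_rules: target_a = linear_and_symbol_rules[target_a]`,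
-- fuel-bounded; under Pre_ (acyclic mapping) fuel m.size+1 is never exhausted (exact there).
def pvResolveA (m : PySem.Dict String String) : Nat → String → String
  | 0, x => x
  | fuel + 1, x =>
    match m.get? x with
    | some y => pvResolveA m fuel y
    | none => x

def moveSymbolHead (head_list : List (String × String × Bool × Bool × String × Bool)) :
    List (String × String × Bool × Bool × String × Bool) :=
  let m := pvRules head_list
  head_list.foldl
    (fun result_head e =>
      if e.2.2.2.1 then result_head ++ [(pvResolveA m (m.size + 1) e.1, e.2)]
      else result_head ++ [e]) []

-- ===== PORT B =====

-- B's inner while-loop: walk the chain collecting the path until a memoized, terminal or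
-- already-visited symbol, then write the final symbol into the memo for every symbol on the
-- path (path compression; the path check stops on cycles, which only inputs outside Pre_ have).
-- Fuel-bounded; under Pre_ fuel m.size+1 is never exhausted (exact there).
def pvWalkB (m : PySem.Dict String String) (memo : PySem.Dict String String) :
    Nat → String → List String → String × PySem.Dict String String
  | 0, x, path =>
    let root := memo.getD x x
    (root, path.foldl (fun d p => d.insert p root) memo)
  | fuel + 1, x, path =>
    if m.contains x && !(memo.contains x) && !(path.contains x) then
      pvWalkB m memo fuel (m.getD x x) (path ++ [x])
    else
      let root := memo.getD x x
      (root, path.foldl (fun d p => d.insert p root) memo)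

def moveSymbolHead_alt (head_list : List (String × String × Bool × Bool × String × Bool)) :
    List (String × String × Bool × Bool × String × Bool) :=
  let m := pvRules head_list
  (head_list.foldl
    (fun st e =>
      if e.2.2.2.1 then
        let r := pvWalkB m st.2 (m.size + 1) e.1 []
        (st.1 ++ [(r.1, e.2)], r.2)
      else (st.1 ++ [e], st.2))
    (([] : List (String × String × Bool × Bool × String × Bool)), PySem.Dict.empty)).1

-- ===== PRECONDITION & SPEC =====

-- one chain-following step through the mapping (identity on non-keys)
def pvStep (m : PySem.Dict String String) (x : String) : String := m.getD x x

-- Pre_ excludes exactly the inputs on which A's while loop never terminates (it returns no value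
-- there): some s_rule entry whose chain through the rule mapping runs into a cycle. Stated
-- closed-form: from each s_rule entry's head symbol, m.size chain steps leave the key set
-- (an acyclic chain visits distinct keys, so it always exits within m.size steps).
def Pre_moveSymbolHead (head_list : List (String × String × Bool × Bool × String × Bool)) : Prop :=
  ∀ e ∈ head_list, e.2.2.2.1 = true →
    (pvRules head_list).contains ((pvStep (pvRules head_list))^[(pvRules head_list).size] e.1) = false

instance (head_list : List (String × String × Bool × Bool × String × Bool)) :
    Decidable (Pre_moveSymbolHead head_list) := by unfold Pre_moveSymbolHead; infer_instance

def pvWitness_moveSymbolHead : (List (String × String × Bool × Bool × String × Bool)) :=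
  [("NP", "VP", true, true, "lbl", false), ("S", "NP", true, true, "lbl2", true)]

def Spec_moveSymbolHead (head_list : List (String × String × Bool × Bool × String × Bool)) (out : List (String × String × Bool × Bool × String × Bool)) : Prop := out = moveSymbolHead_alt head_list
instance (head_list : List (String × String × Bool × Bool × String × Bool)) (out : List (String × String × Bool × Bool × String × Bool)) : Decidable (Spec_moveSymbolHead head_list out) := by unfold Spec_moveSymbolHead; infer_instance

-- ===== CLAIM (what is proved, stated in full; the proofs are below) =====
def Claim_equal_moveSymbolHead : Prop := ∀ (head_list : List (String × String × Bool × Bool × String × Bool)), Dom_moveSymbolHead head_list → Pre_moveSymbolHead head_list → Spec_moveSymbolHead head_list (moveSymbolHead head_list)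

-- ===== LEMMAS AND PROOFS =====

theorem pvWitness_pre : Dom_moveSymbolHead pvWitness_moveSymbolHead ∧
    Pre_moveSymbolHead pvWitness_moveSymbolHead := by decide

-- resolveA is fuel-insensitive (and lands outside the key set) once some iterate exits the keys
theorem pvResolveA_exit (m : PySem.Dict String String) :
    ∀ n, ∀ f₁ f₂ x, m.contains ((pvStep m)^[n] x) = false → n ≤ f₁ → n ≤ f₂ →
      pvResolveA m f₁ x = pvResolveA m f₂ x ∧ m.contains (pvResolveA m f₁ x) = false := by
  intro n
  induction n with
  | zero =>
    intro f₁ f₂ x hx _ _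
    simp only [Function.iterate_zero, id] at hx
    have hg : m.get? x = none := by
      rcases h : m.get? x with _ | v
      · rfl
      · exfalso
        have := PySem.Dict.contains_eq_isSome_get? (d := m) (k := x)
        rw [h] at this; simp [this] at hx
    have hval : ∀ f, pvResolveA m f x = x := by
      intro f; cases f with
      | zero => rfl
      | succ g => simp [pvResolveA, hg]
    rw [hval, hval]; exact ⟨rfl, hx⟩
  | succ n ih =>
    intro f₁ f₂ x hx h1 h2
    rcases hc : m.get? x with _ | y
    · -- x not a key: step fixes x, so iterates stay at x
      have hcontains : m.contains x = false := by
        have := PySem.Dict.contains_eq_isSome_get? (d := m) (k := x)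
        rw [hc] at this; simpa using this
      have hval : ∀ f, pvResolveA m f x = x := by
        intro f; cases f with
        | zero => rfl
        | succ g => simp [pvResolveA, hc]
      rw [hval, hval]; exact ⟨rfl, hcontains⟩
    · -- x is a key: unfold one step on both fuels
      obtain ⟨g₁, rfl⟩ : ∃ g, f₁ = g + 1 := ⟨f₁ - 1, by omega⟩
      obtain ⟨g₂, rfl⟩ : ∃ g, f₂ = g + 1 := ⟨f₂ - 1, by omega⟩
      have hstep : pvStep m x = y := by
        simp [pvStep, PySem.Dict.getD_eq_get?_getD, hc]
      rw [Function.iterate_succ_apply, hstep] at hx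
      have := ih g₁ g₂ y hx (by omega) (by omega)
      simpa [pvResolveA, hc] using this

-- the value A computes for a start symbol
def pvR (m : PySem.Dict String String) (x : String) : String := pvResolveA m (m.size + 1) x

def pvMemoGood (m memo : PySem.Dict String String) : Prop :=
  ∀ k v, memo.get? k = some v → v = pvR m k

theorem pvR_not_key (m : PySem.Dict String String) (x : String)
    (hg : m.get? x = none) : pvR m x = x := by
  simp [pvR, pvResolveA, hg]

theorem pvR_step (m : PySem.Dict String String)
    (x y : String) (hc : m.get? x = some y)
    (hy : ∃ n, n ≤ m.size ∧ m.contains ((pvStep m)^[n] y) = false) : pvR m x = pvR m y := by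
  obtain ⟨n, hn, hexit⟩ := hy
  have h1 : pvR m x = pvResolveA m m.size y := by
    simp [pvR, pvResolveA, hc]
  have h2 := pvResolveA_exit m n m.size (m.size + 1) y hexit hn (by omega)
  rw [h1, h2.1]; rfl

-- inserting correct roots for a whole path preserves memo correctness
theorem pvMemoGood_writeback (m : PySem.Dict String String) (root : String) :
    ∀ (path : List String) (memo : PySem.Dict String String), pvMemoGood m memo →
      (∀ p ∈ path, pvR m p = root) →
      pvMemoGood m (path.foldl (fun d p => d.insert p root) memo) := by
  intro path
  induction path with
  | nil => intro memo hg _; simpa using hg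
  | cons p ps ih =>
    intro memo hg hpath
    simp only [List.foldl_cons]
    refine ih (memo.insert p root) ?_ (fun q hq => hpath q (List.mem_cons_of_mem _ hq))
    intro k v hk
    rw [PySem.Dict.get?_insert] at hk
    split at hk
    · rename_i hkp; cases hk; rw [hkp]; exact (hpath p (List.mem_cons_self)).symm
    · exact hg k v hk

-- the memoized, path-compressed walk returns exactly A's chain value and keeps the memo correct
theorem pvWalkB_spec (m : PySem.Dict String String) :
    ∀ (fuel : Nat) (x : String) (path : List String) (memo : PySem.Dict String String),
      fuel ≤ m.size + 1 →
      (∃ n, n ≤ fuel ∧ m.contains ((pvStep m)^[n] x) = false) →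
      pvMemoGood m memo → (∀ p ∈ path, pvR m p = pvR m x) →
      (∀ p ∈ path, m.contains p = true) →
      (∀ p ∈ path, pvStep m p ∈ path ∨ pvStep m p = x) →
      (pvWalkB m memo fuel x path).1 = pvR m x ∧ pvMemoGood m (pvWalkB m memo fuel x path).2 := by
  intro fuel
  induction fuel with
  | zero =>
    intro x path memo _ hex hg hpath _ _
    obtain ⟨n, hn, hexit⟩ := hex
    interval_cases n
    simp only [Function.iterate_zero, id] at hexit
    have hgx : m.get? x = none := by
      have := PySem.Dict.contains_eq_isSome_get? (d := m) (k := x)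
      rw [hexit] at this
      rcases h : m.get? x with _ | v
      · rfl
      · rw [h] at this; simp at this
    have hroot : memo.getD x x = pvR m x := by
      rcases hmx : memo.get? x with _ | v
      · rw [PySem.Dict.getD_eq_get?_getD, hmx]; exact (pvR_not_key m x hgx).symm
      · rw [PySem.Dict.getD_eq_get?_getD, hmx]; exact hg x v hmx
    simp only [pvWalkB]
    exact ⟨hroot, pvMemoGood_writeback m _ path memo hg
      (fun p hp => by rw [hroot]; exact hpath p hp)⟩
  | succ f ih =>
    intro x path memo hfuel hex hg hpath hkey hchain
    by_cases hbr : (m.contains x && !(memo.contains x) && !(path.contains x)) = true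
    · -- keep walking the chain
      obtain ⟨⟨hmx, hmemo⟩, hnp⟩ : (m.contains x = true ∧ memo.contains x = false) ∧
          path.contains x = false := by
        revert hbr; cases m.contains x <;> cases memo.contains x <;>
          cases h : path.contains x <;> simp
      rcases hgx : m.get? x with _ | y
      · exfalso
        have := PySem.Dict.contains_eq_isSome_get? (d := m) (k := x)
        rw [hgx] at this; rw [hmx] at this; simp at this
      have hstepx : m.getD x x = y := by
        rw [PySem.Dict.getD_eq_get?_getD, hgx]; rfl
      obtain ⟨n, hn, hexit⟩ := hex
      have hn0 : n ≠ 0 := by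
        intro h; subst h
        simp only [Function.iterate_zero, id] at hexit
        rw [hmx] at hexit; cases hexit
      obtain ⟨n', rfl⟩ : ∃ n', n = n' + 1 := ⟨n - 1, by omega⟩
      have hexit' : m.contains ((pvStep m)^[n'] y) = false := by
        rw [Function.iterate_succ_apply] at hexit
        have : pvStep m x = y := by rw [pvStep, hstepx]
        rwa [this] at hexit
      have hRxy : pvR m x = pvR m y :=
        pvR_step m x y hgx ⟨n', by omega, hexit'⟩
      have hstep_eq : pvStep m x = y := by rw [pvStep, hstepx]
      have hrec := ih y (path ++ [x]) memo (by omega) ⟨n', by omega, hexit'⟩ hg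
        (by
          intro p hp
          rcases List.mem_append.mp hp with hp | hp
          · rw [hpath p hp]; exact hRxy
          · rcases List.mem_singleton.mp hp with rfl; exact hRxy)
        (by
          intro p hp
          rcases List.mem_append.mp hp with hp | hp
          · exact hkey p hp
          · rcases List.mem_singleton.mp hp with rfl; exact hmx)
        (by
          intro p hp
          rcases List.mem_append.mp hp with hp | hp
          · rcases hchain p hp with h | h
            · exact Or.inl (List.mem_append.mpr (Or.inl h))
            · exact Or.inl (List.mem_append.mpr (Or.inr (by rw [h]; exact List.mem_singleton.mpr rfl)))
          · rcases List.mem_singleton.mp hp with rfl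
            exact Or.inr hstep_eq)
      simp only [pvWalkB, hbr, if_true, hstepx]
      rw [hRxy]
      exact hrec
    · -- finished: x is memoized or terminal
      have hroot : memo.getD x x = pvR m x := by
        rcases hmx : memo.get? x with _ | v
        · have hmemoc : memo.contains x = false := by
            have := PySem.Dict.contains_eq_isSome_get? (d := memo) (k := x)
            rw [hmx] at this; simpa using this
          have hmc : m.contains x = false := by
            rcases h : m.contains x with _ | _
            · rfl
            · -- then the walk stopped because x is on the path: a cycle, impossible under exit
              exfalso
              have hxp : path.contains x = true := by
                revert hbr; rw [h, hmemoc]; cases hp : path.contains x <;> simp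
              have hxmem : x ∈ path := by simpa using hxp
              have hstay : ∀ k, (pvStep m)^[k] x ∈ path := by
                intro k
                induction k with
                | zero => simpa using hxmem
                | succ k ihk =>
                  rw [Function.iterate_succ_apply']
                  rcases hchain _ ihk with hh | hh
                  · exact hh
                  · rw [hh]; exact hxmem
              obtain ⟨n, _, hexit⟩ := hex
              have := hkey _ (hstay n)
              rw [this] at hexit; cases hexit
          have hgx : m.get? x = none := by
            have := PySem.Dict.contains_eq_isSome_get? (d := m) (k := x)
            rw [hmc] at this
            rcases h : m.get? x with _ | v
            · rfl
            · rw [h] at this; simp at this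
          rw [PySem.Dict.getD_eq_get?_getD, hmx]
          exact (pvR_not_key m x hgx).symm
        · rw [PySem.Dict.getD_eq_get?_getD, hmx]; exact hg x v hmx
      simp only [pvWalkB, hbr]
      constructor
      · simpa using hroot
      · refine pvMemoGood_writeback m _ path memo hg ?_
        intro p hp
        have : (memo.getD x x) = pvR m x := hroot
        rw [this]; exact hpath p hp

-- A's fold and B's memo-threading fold build the same result list
theorem pvFold_spec (m : PySem.Dict String String) :
    ∀ (l : List (String × String × Bool × Bool × String × Bool)),
      (∀ e ∈ l, e.2.2.2.1 = true → m.contains ((pvStep m)^[m.size] e.1) = false) →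
      ∀
      (acc : List (String × String × Bool × Bool × String × Bool))
      (memo : PySem.Dict String String), pvMemoGood m memo →
      (l.foldl
        (fun st e =>
          if e.2.2.2.1 then
            let r := pvWalkB m st.2 (m.size + 1) e.1 []
            (st.1 ++ [(r.1, e.2)], r.2)
          else (st.1 ++ [e], st.2)) (acc, memo)).1
      = l.foldl
          (fun result_head e =>
            if e.2.2.2.1 then result_head ++ [(pvResolveA m (m.size + 1) e.1, e.2)]
            else result_head ++ [e]) acc := by
  intro l
  induction l with
  | nil => intro _ acc memo _; rfl
  | cons e t ih =>
    intro hP acc memo hg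
    have hPt : ∀ e' ∈ t, e'.2.2.2.1 = true → m.contains ((pvStep m)^[m.size] e'.1) = false :=
      fun e' he' => hP e' (List.mem_cons_of_mem _ he')
    by_cases he : e.2.2.2.1 = true
    · have hexit := hP e List.mem_cons_self he
      have hw := pvWalkB_spec m (m.size + 1) e.1 [] memo le_rfl ⟨m.size, by omega, hexit⟩ hg
        (by intro p hp; simp at hp) (by intro p hp; simp at hp) (by intro p hp; simp at hp)
      simp only [List.foldl_cons, he, if_true]
      rw [ih hPt _ _ hw.2, hw.1]
      rfl
    · simp only [List.foldl_cons, he]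
      exact ih hPt _ _ hg

-- ===== VERDICT (by name: the statement is the Claim_ definition above) =====
theorem moveSymbolHead_spec : Claim_equal_moveSymbolHead := by
  intro hl _ hPre
  unfold Spec_moveSymbolHead moveSymbolHead moveSymbolHead_alt
  exact (pvFold_spec (pvRules hl) hl hPre [] PySem.Dict.empty
    (by intro k v h; rw [PySem.Dict.get?_empty] at h; cases h)).symm
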